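-- pv_equiv track=rewrite | github.com/kamal3235/practice_code | migratory_bird.py | migratory_bird
-- ===== SOURCE A (Python) =====
-- def migratory_bird(arr):
--     freq = {}
--     for item in arr:
--         if item in freq:
--             freq[item] += 1
--         else:
--             freq[item] = 1
--     # Finding the key with max value
--     max_count = max(freq.values())
--     most_freq_type = [type for type, count in freq.items() if count == max_count]
--
--     return min(most_freq_type)
-- ===== SOURCE B (Python) =====
-- def migratory_bird(arr):
--     # Sort, then scan runs of equal values: the first longest run wins,
--     # and since the list is sorted ascending that is the smallest such value.
--     best = None
--     best_count = 0
--     run_val = None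
--     run_count = 0
--     for x in sorted(arr):
--         if x == run_val:
--             run_count += 1
--         else:
--             run_val = x
--             run_count = 1
--         if run_count > best_count:
--             best_count = run_count
--             best = x
--     return best
-- ===== Notes on version B (the rewrite author's own statement) =====
-- stated objective: alternative
-- what changed: Replaces the frequency-dict plus max/filter/min pipeline by sort-then-scan: sort the array and walk it once counting runs of equal values, keeping the first (hence smallest) value whose run is strictly longest; the empty list, on which A raises ValueError (max of empty sequence), is excluded by Pre_.
import Mathlib
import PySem

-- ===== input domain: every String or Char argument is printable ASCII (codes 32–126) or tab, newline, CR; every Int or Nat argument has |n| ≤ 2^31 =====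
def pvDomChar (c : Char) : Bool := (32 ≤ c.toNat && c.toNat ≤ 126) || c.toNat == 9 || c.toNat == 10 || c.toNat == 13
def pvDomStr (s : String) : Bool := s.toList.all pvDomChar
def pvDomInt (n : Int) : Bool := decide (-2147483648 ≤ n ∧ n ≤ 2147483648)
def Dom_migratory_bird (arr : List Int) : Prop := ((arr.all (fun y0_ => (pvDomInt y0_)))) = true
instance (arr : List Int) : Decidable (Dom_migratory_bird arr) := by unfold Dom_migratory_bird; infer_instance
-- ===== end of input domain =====

-- B replaces the frequency-dict + max()/comprehension/min() pipeline by a different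
-- algorithm: sort the array and scan it once counting runs of equal values, keeping
-- the first (hence smallest) value whose run is strictly longest (objective: alternative).

-- ===== PORT A =====
def migratory_bird (arr : List Int) : Int :=
  let freq := arr.foldl (fun d item =>
    if d.contains item then d.modify item 0 (· + 1) else d.insert item 1)
    (PySem.Dict.empty : PySem.Dict Int Int)
  match PySem.List.max? freq.values (fun v => v) with
  | none => 0      -- max([]) raises ValueError in Python; excluded by Pre_
  | some maxCount =>
    let mostFreqType := (freq.items.filter (fun p => p.2 == maxCount)).map (fun p => p.1)
    match PySem.List.min? mostFreqType (fun v => v) with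
    | none => 0    -- unreachable under Pre_
    | some m => m

-- ===== PORT B =====
-- the loop body of Source B: state (best, best_count, run_val, run_count)
def pvStepB (st : Option Int × Int × Option Int × Int) (x : Int) :
    Option Int × Int × Option Int × Int :=
  match st with
  | (best, bc, rv, rc) =>
    let rc' := if rv == some x then rc + 1 else 1
    if rc' > bc then (some x, rc', some x, rc') else (best, bc, some x, rc')

def migratory_bird_alt (arr : List Int) : Int :=
  let s := PySem.List.sorted arr (fun x => x) false
  let st := s.foldl pvStepB (none, 0, none, 0)
  match st.1 with
  | none => 0      -- Python B returns None on empty input; excluded by Pre_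
  | some b => b

-- ===== PRECONDITION & SPEC =====
-- On the empty list A raises ValueError (max of an empty sequence) and B's Python
-- returns None, not an int; Pre_ excludes exactly the empty list.
def Pre_migratory_bird (arr : List Int) : Prop := arr ≠ []
instance (arr : List Int) : Decidable (Pre_migratory_bird arr) := by unfold Pre_migratory_bird; infer_instance
def pvWitness_migratory_bird : List Int := ([1, 2, 2, 3])
def Spec_migratory_bird (arr : List Int) (out : Int) : Prop := out = migratory_bird_alt arr
instance (arr : List Int) (out : Int) : Decidable (Spec_migratory_bird arr out) := by unfold Spec_migratory_bird; infer_instance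

-- ===== CLAIM (what is proved, stated in full; the proofs are below) =====
def Claim_equal_migratory_bird : Prop := ∀ (arr : List Int), Dom_migratory_bird arr → Pre_migratory_bird arr → Spec_migratory_bird arr (migratory_bird arr)

-- ===== LEMMAS AND PROOFS =====

-- The smallest element of maximal multiplicity: the value both programs return.
def pvBest (arr : List Int) (b : Int) : Prop :=
  b ∈ arr ∧ (∀ y ∈ arr, arr.count y ≤ arr.count b) ∧
    (∀ y ∈ arr, arr.count y = arr.count b → b ≤ y)

theorem pvBest_unique {arr : List Int} {b₁ b₂ : Int}
    (h₁ : pvBest arr b₁) (h₂ : pvBest arr b₂) : b₁ = b₂ := by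
  obtain ⟨m₁, max₁, min₁⟩ := h₁
  obtain ⟨m₂, max₂, min₂⟩ := h₂
  have hc : arr.count b₁ = arr.count b₂ :=
    le_antisymm (max₂ _ m₁) (max₁ _ m₂)
  exact le_antisymm (min₁ _ m₂ hc.symm) (min₂ _ m₁ hc)

-- Invariant of B's scan after consuming the (sorted) prefix p.
def pvInvB (p : List Int) (st : Option Int × Int × Option Int × Int) : Prop :=
  match st with
  | (best, bc, rv, rc) =>
    (p = [] ∧ best = none ∧ bc = 0 ∧ rv = none) ∨
    (∃ l b, rv = some l ∧ l ∈ p ∧ (∀ y ∈ p, y ≤ l) ∧ rc = (p.count l : Int) ∧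
      best = some b ∧ bc = (p.count b : Int) ∧ b ∈ p ∧
      (∀ y ∈ p, p.count y ≤ p.count b) ∧
      (∀ y ∈ p, p.count y = p.count b → b ≤ y))

theorem pvInvB_step (p : List Int) (x : Int) (st : Option Int × Int × Option Int × Int)
    (hle : ∀ y ∈ p, y ≤ x) (h : pvInvB p st) : pvInvB (p ++ [x]) (pvStepB st x) := by
  obtain ⟨best, bc, rv, rc⟩ := st
  have hcnt : ∀ y : Int, (p ++ [x]).count y = p.count y + if y = x then 1 else 0 := by
    intro y
    by_cases hyx : y = x
    · subst hyx; simp [List.count_append]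
    · have : ¬ x = y := fun hh => hyx hh.symm
      simp [List.count_append, hyx, this]
  rcases h with ⟨hp, hb, hbc, hrv⟩ | ⟨l, b, hrv, hlm, hlmax, hrc, hb, hbc, hbm, hmax, hmin⟩
  · -- empty prefix: start the first run with x, which becomes best
    subst hp hb hbc hrv
    have hstep : pvStepB (none, 0, none, rc) x = (some x, 1, some x, 1) := by
      simp [pvStepB]
    rw [hstep]
    refine Or.inr ⟨x, x, rfl, ?_, ?_, ?_, rfl, ?_, ?_, ?_, ?_⟩
    · simp
    · intro y hy; simp at hy; omega
    · simp
    · simp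
    · simp
    · intro y hy; simp at hy; subst hy; exact le_refl _
    · intro y hy _; simp at hy; omega
  · -- nonempty prefix
    subst hb hrv
    have hmemApp : ∀ y, y ∈ p ++ [x] → y = x ∨ y ∈ p := by
      intro y hy
      rcases List.mem_append.mp hy with hy | hy
      · exact Or.inr hy
      · simp at hy; exact Or.inl hy
    by_cases hxl : l = x
    · -- run continues: x equals the current run value
      subst hxl
      have hrc' : ((p ++ [l]).count l : Int) = rc + 1 := by
        rw [hcnt]; simp [hrc]
      by_cases hgt : rc + 1 > bc
      · have hstep : pvStepB (some b, bc, some l, rc) l = (some l, rc + 1, some l, rc + 1) := by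
          simp only [pvStepB, BEq.rfl, if_true]
          rw [if_pos hgt]
        rw [hstep]
        refine Or.inr ⟨l, l, rfl, ?_, ?_, hrc'.symm, rfl, hrc'.symm, ?_, ?_, ?_⟩
        · simp
        · intro y hy
          rcases hmemApp y hy with hy | hy
          · omega
          · exact hlmax y hy
        · simp
        · intro y hy
          by_cases hyl : y = l
          · subst hyl; exact le_refl _
          · have h1 : (p ++ [l]).count y = p.count y := by rw [hcnt]; simp [hyl]
            have h2 : p.count y ≤ p.count b := by
              rcases hmemApp y hy with hy | hy
              · exact absurd hy hyl
              · exact hmax y hy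
            omega
        · intro y hy hcy
          by_cases hyl : y = l
          · subst hyl; exact le_refl _
          · have h1 : (p ++ [l]).count y = p.count y := by rw [hcnt]; simp [hyl]
            have h2 : p.count y ≤ p.count b := by
              rcases hmemApp y hy with hy | hy
              · exact absurd hy hyl
              · exact hmax y hy
            omega
      · -- keep the old best; b ≠ l since otherwise the run would exceed bc
        have hbl : b ≠ l := by intro hbl; subst hbl; omega
        have hstep : pvStepB (some b, bc, some l, rc) l = (some b, bc, some l, rc + 1) := by
          simp only [pvStepB, BEq.rfl, if_true]
          rw [if_neg hgt]
        rw [hstep]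
        have hcb : (p ++ [l]).count b = p.count b := by rw [hcnt]; simp [hbl]
        refine Or.inr ⟨l, b, rfl, ?_, ?_, hrc'.symm, rfl, ?_, ?_, ?_, ?_⟩
        · simp
        · intro y hy
          rcases hmemApp y hy with hy | hy
          · omega
          · exact hlmax y hy
        · rw [hcb]; exact hbc
        · exact List.mem_append.mpr (Or.inl hbm)
        · intro y hy
          by_cases hyl : y = l
          · subst hyl; omega
          · have h1 : (p ++ [l]).count y = p.count y := by rw [hcnt]; simp [hyl]
            have h2 : p.count y ≤ p.count b := by
              rcases hmemApp y hy with hy | hy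
              · exact absurd hy hyl
              · exact hmax y hy
            omega
        · intro y hy hcy
          by_cases hyl : y = l
          · subst hyl; exact hle b hbm
          · have h1 : (p ++ [l]).count y = p.count y := by rw [hcnt]; simp [hyl]
            have hyp : y ∈ p := by
              rcases hmemApp y hy with hy | hy
              · exact absurd hy hyl
              · exact hy
            exact hmin y hyp (by omega)
    · -- new run: x differs from the run value; then x is not in p at all
      have hxp : x ∉ p := by
        intro hx
        exact hxl (le_antisymm (hle l hlm) (hlmax x hx))
      have hcx : (p ++ [x]).count x = 1 := by
        rw [hcnt, List.count_eq_zero.mpr hxp]; simp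
      have hbpos : 1 ≤ p.count b := List.count_pos_iff.mpr hbm
      have hbeq : ((some l : Option Int) == some x) = false := by simp [hxl]
      have hgt : ¬ ((1 : Int) > bc) := by omega
      have hbx : b ≠ x := fun hbxe => hxp (hbxe ▸ hbm)
      have hcb : (p ++ [x]).count b = p.count b := by rw [hcnt]; simp [hbx]
      have hstep : pvStepB (some b, bc, some l, rc) x = (some b, bc, some x, 1) := by
        simp only [pvStepB, hbeq, if_false, Bool.false_eq_true]
        rw [if_neg hgt]
      rw [hstep]
      refine Or.inr ⟨x, b, rfl, ?_, ?_, ?_, rfl, ?_, ?_, ?_, ?_⟩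
      · simp
      · intro y hy
        rcases hmemApp y hy with hy | hy
        · omega
        · exact hle y hy
      · rw [hcx]; simp
      · rw [hcb]; exact hbc
      · exact List.mem_append.mpr (Or.inl hbm)
      · intro y hy
        by_cases hyx : y = x
        · subst hyx; omega
        · have h1 : (p ++ [x]).count y = p.count y := by rw [hcnt]; simp [hyx]
          have h2 : p.count y ≤ p.count b := by
            rcases hmemApp y hy with hy | hy
            · exact absurd hy hyx
            · exact hmax y hy
          omega
      · intro y hy hcy
        by_cases hyx : y = x
        · subst hyx; exact hle b hbm
        · have h1 : (p ++ [x]).count y = p.count y := by rw [hcnt]; simp [hyx]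
          have hyp : y ∈ p := by
            rcases hmemApp y hy with hy | hy
            · exact absurd hy hyx
            · exact hy
          exact hmin y hyp (by omega)

theorem pvFoldB_inv : ∀ (rest p : List Int) (st : Option Int × Int × Option Int × Int),
    (p ++ rest).Pairwise (· ≤ ·) → pvInvB p st →
    pvInvB (p ++ rest) (rest.foldl pvStepB st) := by
  intro rest
  induction rest with
  | nil => intro p st _ h; simpa using h
  | cons x t ih =>
    intro p st hpw h
    have hle : ∀ y ∈ p, y ≤ x := by
      intro y hy
      have := (List.pairwise_append.mp hpw).2.2 y hy x List.mem_cons_self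
      exact this
    have h1 : pvInvB (p ++ [x]) (pvStepB st x) := pvInvB_step p x st hle h
    have hpw' : ((p ++ [x]) ++ t).Pairwise (· ≤ ·) := by
      rw [List.append_assoc]; simpa using hpw
    have := ih (p ++ [x]) (pvStepB st x) hpw' h1
    simpa [List.append_assoc] using this

theorem pvAlt_best (arr : List Int) (h : arr ≠ []) : pvBest arr (migratory_bird_alt arr) := by
  set s := PySem.List.sorted arr (fun x => x) false with hs
  have hperm : s.Perm arr := PySem.List.sorted_perm arr (fun x => x) false
  have hpw : s.Pairwise (· ≤ ·) := PySem.List.sorted_pairwise arr (fun x => x)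
  have hinv : pvInvB s (s.foldl pvStepB (none, 0, none, 0)) := by
    have := pvFoldB_inv s [] (none, 0, none, 0) (by simpa using hpw)
      (Or.inl ⟨rfl, rfl, rfl, rfl⟩)
    simpa using this
  have hsne : s ≠ [] := by
    intro hnil
    exact h ((hnil ▸ hperm).symm.eq_nil)
  obtain ⟨bst, bc, rv, rc⟩ : ∃ st, s.foldl pvStepB (none, 0, none, 0) = st := ⟨_, rfl⟩
  rcases hinv with ⟨hnil, _⟩ | ⟨l, b, hrv, hlm, hlmax, hrc, hbst, hbc, hbm, hmax, hmin⟩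
  · exact absurd hnil hsne
  have hout : migratory_bird_alt arr = b := by
    show (match (s.foldl pvStepB (none, 0, none, 0)).1 with
      | none => (0 : Int) | some b => b) = b
    rw [hbst]
  rw [hout]
  refine ⟨hperm.mem_iff.mp hbm, ?_, ?_⟩
  · intro y hy
    rw [← hperm.count_eq, ← hperm.count_eq]
    exact hmax y (hperm.mem_iff.mpr hy)
  · intro y hy hcy
    refine hmin y (hperm.mem_iff.mpr hy) ?_
    rw [← hperm.count_eq y, ← hperm.count_eq b] at hcy
    exact hcy

theorem pvA_best (arr : List Int) (h : arr ≠ []) : pvBest arr (migratory_bird arr) := by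
  -- the frequency loop builds exactly Counter(arr)
  have hfreq : arr.foldl (fun d item =>
      if d.contains item then d.modify item 0 (· + 1) else d.insert item 1)
      (PySem.Dict.empty : PySem.Dict Int Int) = PySem.Dict.counter arr := by
    rw [PySem.Dict.counter_eq_foldl]
    congr 1
    funext d x
    by_cases hcont : d.contains x
    · simp [hcont, PySem.Dict.modify]
    · have hcf : d.contains x = false := by simpa using hcont
      simp [hcf, PySem.Dict.modify, PySem.Dict.getD_of_not_contains d 0 hcf]
  have hvals : (PySem.Dict.counter arr).values
      = (PySem.Set.ofList arr).map (fun k => ((arr.count k : Nat) : Int)) := by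
    rw [PySem.Dict.values_eq_map_keys _ (PySem.Dict.nodup_keys_counter arr) 0,
      PySem.Dict.keys_counter]
    simp only [PySem.Dict.getD_counter]
  obtain ⟨a, t, harr⟩ := List.exists_cons_of_ne_nil h
  have hmem_a : a ∈ PySem.Set.ofList arr := by
    rw [PySem.Set.mem_ofList]; rw [harr]; exact List.mem_cons_self
  have hne : (PySem.Dict.counter arr).values ≠ [] := by
    rw [hvals]
    intro hnil
    rw [List.map_eq_nil_iff] at hnil
    rw [hnil] at hmem_a
    exact absurd hmem_a (List.not_mem_nil)
  rcases hmax : PySem.List.max? (PySem.Dict.counter arr).values (fun v => v) with _ | M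
  · exact absurd ((PySem.List.max?_eq_none_iff _ _).mp hmax) hne
  have hMmax : ∀ k ∈ arr, ((arr.count k : Nat) : Int) ≤ M := by
    intro k hk
    refine PySem.List.max?_isMax hmax _ ?_
    rw [hvals]
    exact List.mem_map_of_mem ((PySem.Set.mem_ofList arr k).mpr hk)
  obtain ⟨k0, hk0mem, hk0⟩ : ∃ k0, k0 ∈ arr ∧ ((arr.count k0 : Nat) : Int) = M := by
    have := PySem.List.max?_mem hmax
    rw [hvals] at this
    obtain ⟨k0, hk0, hval⟩ := List.mem_map.mp this
    exact ⟨k0, (PySem.Set.mem_ofList arr k0).mp hk0, hval⟩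
  -- the filtered key list
  have hlist : ((PySem.Dict.counter arr).items.filter (fun p => p.2 == M)).map (fun p => p.1)
      = ((PySem.Set.ofList arr).filter (fun k => ((arr.count k : Nat) : Int) == M)) := by
    rw [PySem.Dict.items_counter, List.filter_map, List.map_map]
    simp only [Function.comp_def]
    simp
  have hk0in : k0 ∈ ((PySem.Set.ofList arr).filter (fun k => ((arr.count k : Nat) : Int) == M)) := by
    rw [List.mem_filter]
    exact ⟨(PySem.Set.mem_ofList arr k0).mpr hk0mem, by simp [hk0]⟩
  rcases hmin : PySem.List.min? (((PySem.Dict.counter arr).items.filter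
      (fun p => p.2 == M)).map (fun p => p.1)) (fun v => v) with _ | m
  · rw [hlist] at hmin
    rw [PySem.List.min?_eq_none_iff] at hmin
    rw [hmin] at hk0in
    exact absurd hk0in (List.not_mem_nil)
  -- the port returns m
  have hout : migratory_bird arr = m := by
    simp only [migratory_bird, hfreq, hmax, hmin]
  have hmmem' := PySem.List.min?_mem hmin
  rw [hlist, List.mem_filter] at hmmem'
  obtain ⟨hmof, hmcnt⟩ := hmmem'
  have hmcnt' : ((arr.count m : Nat) : Int) = M := by simpa using hmcnt
  have hmin_all : ∀ y ∈ arr, arr.count y = arr.count m → m ≤ y := by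
    intro y hy hcy
    refine PySem.List.min?_isMin hmin _ ?_
    rw [hlist, List.mem_filter]
    refine ⟨(PySem.Set.mem_ofList arr y).mpr hy, ?_⟩
    simp only [hcy]
    simpa using hmcnt
  rw [hout]
  refine ⟨(PySem.Set.mem_ofList arr m).mp hmof, ?_, hmin_all⟩
  intro y hy
  have h1 := hMmax y hy
  rw [← hmcnt'] at h1
  exact_mod_cast h1

-- ===== VERDICT (by name: the statement is the Claim_ definition above) =====
theorem migratory_bird_spec : Claim_equal_migratory_bird := by
  intro arr _ hpre
  exact pvBest_unique (pvA_best arr hpre) (pvAlt_best arr hpre)
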